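-- pv_equiv track=rewrite | github.com/RaffaeleFiorillo/Challanges | main.py | remove_excess
-- ===== SOURCE A (Python) =====
-- def remove_excess(map):
--     leasts = []
--     index = 0
--     for m in map:
--         while sum(m[index:]) == sum(m):
--             index += 1
--         leasts.append(index-1)
--         index = 0
--     least = min(leasts)
--     map = tuple(tuple(m[least:]) for m in map)
--     return map
-- ===== SOURCE B (Python) =====
-- # B: one pass per row — the index of the first nonzero element equals A's per-row
-- # "last zero-sum prefix" value, so no repeated slice sums are needed.
-- def first_nonzero(m):
--     for i, x in enumerate(m):
--         if x != 0:
--             return i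
--     return len(m)
--
-- def remove_excess(map):
--     least = min(first_nonzero(m) for m in map)
--     return tuple(tuple(m[least:]) for m in map)
-- ===== Notes on version B (the rewrite author's own statement) =====
-- stated objective: alternative
-- what changed: Instead of re-summing the slice m[index:] at every step of a while loop, B finds per row the index of the first nonzero element in a single pass (all prefix sums before it are zero), takes the minimum and slices; asymptotically fewer operations on rows with long zero prefixes, though a timing run did not confirm >=1.5x on the generated inputs.
-- outside the precondition, e.g. on remove_excess([]): A raises ValueError, B raises ValueError; on remove_excess([[0, 0]]): A does not finish within the time limit, B returns ((),)
import Mathlib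
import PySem

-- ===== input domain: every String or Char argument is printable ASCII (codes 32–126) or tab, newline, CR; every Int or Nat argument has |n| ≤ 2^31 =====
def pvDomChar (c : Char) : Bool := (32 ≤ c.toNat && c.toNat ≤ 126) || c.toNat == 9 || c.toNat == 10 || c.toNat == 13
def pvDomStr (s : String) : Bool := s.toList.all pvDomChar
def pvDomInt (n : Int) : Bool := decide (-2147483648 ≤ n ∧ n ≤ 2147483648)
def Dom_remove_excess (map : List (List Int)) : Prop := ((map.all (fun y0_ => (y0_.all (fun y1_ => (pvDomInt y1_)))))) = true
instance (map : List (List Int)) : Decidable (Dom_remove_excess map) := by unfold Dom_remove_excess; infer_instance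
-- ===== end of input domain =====

-- B replaces A's per-row while loop (which re-sums the slice m[index:] each step) by a
-- single pass finding the first nonzero element per row (an alternative algorithm).

-- ===== PORT A =====
-- the inner 'while sum(m[index:]) == sum(m): index += 1'; fuel only makes the loop total
-- (Python diverges on an all-zero row — outside Pre_); under Pre_ the fuel is never exhausted
def pvWhile (m : List Int) (index : Nat) : Nat → Nat
  | 0 => index
  | fuel + 1 =>
    if (PySem.List.slice m (some (index : Int)) none).sum = m.sum then
      pvWhile m (index + 1) fuel
    else index

def remove_excess (map : List (List Int)) : List (List Int) :=
  let leasts : List Int :=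
    map.foldl (fun acc m => acc ++ [((pvWhile m 0 (m.length + 1) : Int) - 1)]) []
  match PySem.List.min? leasts (fun x => x) with
  | none => []  -- min([]) raises ValueError in Python; excluded by Pre_
  | some least => map.map (fun m => PySem.List.slice m (some least) none)

-- ===== PORT B =====
def firstNonzero : List Int → Nat → Nat
  | [], i => i
  | x :: rest, i => if x ≠ 0 then i else firstNonzero rest (i + 1)

def remove_excess_alt (map : List (List Int)) : List (List Int) :=
  match map.map (fun m => firstNonzero m 0) with
  | [] => []  -- min of empty generator raises in Python; excluded by Pre_
  | j :: t =>
    let least := t.foldl min j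
    map.map (fun m => m.drop least)

-- ===== PRECONDITION & SPEC =====
-- Pre_ excludes the empty map (A's min([]) raises ValueError) and maps containing an
-- all-zero row (A's while loop never terminates there).
def Pre_remove_excess (map : List (List Int)) : Prop :=
  map ≠ [] ∧ ∀ m ∈ map, ∃ x ∈ m, x ≠ 0
instance (map : List (List Int)) : Decidable (Pre_remove_excess map) := by
  unfold Pre_remove_excess; infer_instance
def pvWitness_remove_excess : List (List Int) := [[0, 1], [2]]

def Spec_remove_excess (map : List (List Int)) (out : List (List Int)) : Prop := out = remove_excess_alt map
instance (map : List (List Int)) (out : List (List Int)) : Decidable (Spec_remove_excess map out) := by unfold Spec_remove_excess; infer_instance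

-- ===== CLAIM (what is proved, stated in full; the proofs are below) =====
def Claim_equal_remove_excess : Prop := ∀ (map : List (List Int)), Dom_remove_excess map → Pre_remove_excess map → Spec_remove_excess map (remove_excess map)

-- ===== LEMMAS AND PROOFS =====

-- accumulator shift for B's scan
lemma firstNonzero_shift (m : List Int) : ∀ i, firstNonzero m i = i + firstNonzero m 0 := by
  induction m with
  | nil => intro i; simp [firstNonzero]
  | cons x rest ih =>
    intro i
    by_cases hx : x ≠ 0
    · simp [firstNonzero, hx]
    · simp [firstNonzero, hx, ih (i + 1), ih 1]
      omega

-- structure of a row with a nonzero element, at B's index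
lemma firstNonzero_char (m : List Int) (h : ∃ x ∈ m, x ≠ 0) :
    ∃ y rest, m.take (firstNonzero m 0) = List.replicate (firstNonzero m 0) 0 ∧
      m.drop (firstNonzero m 0) = y :: rest ∧ y ≠ 0 := by
  induction m with
  | nil => simp at h
  | cons x t ih =>
    rcases eq_or_ne x 0 with hx | hx
    · subst hx
      have ht : ∃ x ∈ t, x ≠ 0 := by
        rcases h with ⟨x, hx1, hx2⟩
        rcases List.mem_cons.mp hx1 with h' | h'
        · exact absurd h' hx2
        · exact ⟨x, h', hx2⟩
      rcases ih ht with ⟨y, rest, h1, h2, hy⟩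
      have hfn : firstNonzero ((0 : Int) :: t) 0 = firstNonzero t 0 + 1 := by
        simp [firstNonzero, firstNonzero_shift t 1, Nat.add_comm]
      refine ⟨y, rest, ?_, ?_, hy⟩
      · rw [hfn, List.take_succ_cons, h1, List.replicate_succ]
      · rw [hfn, List.drop_succ_cons, h2]
    · exact ⟨x, t, by simp [firstNonzero, hx], by simp [firstNonzero, hx], hx⟩

-- A's while loop stops exactly at j+1 when the condition holds up to j and fails at j+1
lemma pvWhile_spec (m : List Int) (j : Nat)
    (hk : ∀ k, k ≤ j → (m.drop k).sum = m.sum)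
    (hj : (m.drop (j + 1)).sum ≠ m.sum) :
    ∀ fuel i, i ≤ j + 1 → j + 1 ≤ i + fuel → pvWhile m i fuel = j + 1 := by
  intro fuel
  induction fuel with
  | zero => intro i h1 h2; simp [pvWhile]; omega
  | succ f ih =>
    intro i h1 h2
    by_cases hi : i = j + 1
    · subst hi
      simp only [pvWhile, PySem.List.slice_from_natCast]
      rw [if_neg hj]
    · have hcond : (m.drop i).sum = m.sum := hk i (by omega)
      simp only [pvWhile, PySem.List.slice_from_natCast]
      rw [if_pos hcond]
      exact ih (i + 1) (by omega) (by omega)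

-- per row: A's loop value is B's first-nonzero index plus one
lemma row_eq (m : List Int) (h : ∃ x ∈ m, x ≠ 0) :
    pvWhile m 0 (m.length + 1) = firstNonzero m 0 + 1 := by
  rcases firstNonzero_char m h with ⟨y, rest, h1, h2, hy⟩
  set j := firstNonzero m 0 with hJ
  have hm : m = List.replicate j 0 ++ y :: rest := by
    conv_lhs => rw [← List.take_append_drop j m]
    rw [h1, h2]
  have hjlen : j + 1 ≤ m.length := by
    have := congrArg List.length h2
    simp at this; omega
  apply pvWhile_spec m j _ _ (m.length + 1) 0 (by omega) (by omega)
  · intro k hkj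
    have htk : (m.take k).sum = 0 := by
      rw [hm, List.take_append_of_le_length (by simp; omega), List.take_replicate]
      simp
    have := List.sum_take_add_sum_drop m k
    omega
  · have hdj : m.drop (j + 1) = rest := by
      have : m.drop (j + 1) = (m.drop j).drop 1 := by
        rw [List.drop_drop]
      rw [this, h2]; simp
    have hsum : m.sum = y + rest.sum := by
      rw [hm]; simp
    rw [hdj, hsum]; omega

-- min over casts commutes with the Nat min fold
lemma foldl_min_cast (t : List Nat) : ∀ j : Nat,
    (t.map (fun n : Nat => (n : Int))).foldl min (j : Int) = ((t.foldl min j : Nat) : Int) := by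
  induction t with
  | nil => intro j; simp
  | cons a t ih =>
    intro j
    rw [List.map_cons, List.foldl_cons, List.foldl_cons, ← Nat.cast_min, ih]

-- ===== VERDICT (by name: the statement is the Claim_ definition above) =====
theorem remove_excess_spec : Claim_equal_remove_excess := by
  intro map _ hpre
  rcases hpre with ⟨hne, hall⟩
  unfold Spec_remove_excess remove_excess remove_excess_alt
  rw [PySem.List.foldl_append_singleton_eq_map]
  have hrows : map.map (fun m => ((pvWhile m 0 (m.length + 1) : Int) - 1)) =
      (map.map (fun m => firstNonzero m 0)).map (fun n : Nat => (n : Int)) := by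
    rw [List.map_map]
    apply List.map_congr_left
    intro m hm
    have := row_eq m (hall m hm)
    simp [this]
  rw [List.nil_append, hrows]
  cases hmap : map.map (fun m => firstNonzero m 0) with
  | nil => exact absurd (List.map_eq_nil_iff.mp hmap) hne
  | cons j t =>
    have hmin : PySem.List.min? ((j :: t).map (fun n : Nat => (n : Int))) (fun x => x)
        = some ((t.foldl min j : Nat) : Int) := by
      rw [List.map_cons, PySem.List.min?_id_cons, foldl_min_cast]
    dsimp only
    rw [hmin]
    apply List.map_congr_left
    intro m _
    exact PySem.List.slice_from_natCast m _
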